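-- pv_equiv track=rewrite | github.com/kuzaxe/Poem-Detector | poetry_functions.py | vowel_finder
-- ===== SOURCE A (Python) =====
-- def vowel_finder(phoneme):
--     r''' (list of str) -> list of str
--
--     Return the last syllable of a word's phoneme.
--
--     >>> vowel_finder(['A', 'HI0', 'D'])
--     ['D', 'HI0']
--     >>> vowel_finder(['DH1'])
--     ['DH1']
--     '''
--     reverse_list = []
--
--     for i in range(1, len(phoneme) + 1):
--         if not(phoneme[-i][-1] in '012'):
--             reverse_list.append(phoneme[-i])
--         else:
--             reverse_list.append(phoneme[-i])
--             return reverse_list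
-- ===== SOURCE B (Python) =====
-- def vowel_finder(phoneme):
--     """Locate the last stress-marked phoneme, then slice and reverse.
--
--     Structurally different from the original: one forward scan records the
--     index of the last phoneme ending in '0'/'1'/'2'; the answer is the
--     suffix from that index, reversed.  Returns None (like the original's
--     fall-through) when no stress-marked phoneme exists.
--     """
--     idx = None
--     for i, p in enumerate(phoneme):
--         if p and p[-1] in '012':
--             idx = i
--     if idx is None:
--         return None
--     return phoneme[idx:][::-1]
-- ===== Notes on version B (the rewrite author's own statement) =====
-- stated objective: alternative
-- what changed: A accumulates phonemes in a backward loop and returns mid-loop at the first stress mark; B does a forward scan that records the index of the last stress-marked phoneme and then returns the suffix slice reversed.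
-- outside the precondition, e.g. on vowel_finder(['AB']): A returns None, B returns None; on vowel_finder(['', 'A']): A raises IndexError, B returns None
import Mathlib
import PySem

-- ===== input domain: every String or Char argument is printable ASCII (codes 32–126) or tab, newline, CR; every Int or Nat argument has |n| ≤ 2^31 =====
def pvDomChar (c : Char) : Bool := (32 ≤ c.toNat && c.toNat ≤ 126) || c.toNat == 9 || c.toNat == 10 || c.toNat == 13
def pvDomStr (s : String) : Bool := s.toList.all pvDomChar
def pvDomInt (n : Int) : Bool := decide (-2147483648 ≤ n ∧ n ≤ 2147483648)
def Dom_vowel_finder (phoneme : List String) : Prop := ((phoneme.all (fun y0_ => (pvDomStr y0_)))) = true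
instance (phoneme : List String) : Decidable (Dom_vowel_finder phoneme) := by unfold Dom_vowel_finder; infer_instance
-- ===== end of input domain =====

-- B replaces A's accumulate-until-return backward loop by a forward scan for the
-- index of the LAST stress-marked phoneme followed by a slice and a reverse
-- (objective: alternative decomposition, same O(n) cost).

-- ===== PORT A =====
-- A's loop 'for i in range(1, len(phoneme)+1)', carrying reverse_list.
-- phoneme[-i] is PySem.List.pyGet? phoneme (-i); phoneme[-i][-1] is pyGet? (toList) (-1)
-- (none = IndexError, outside Pre_).  'c in "012"' for the single char c is exactly
-- membership of c among the three characters.  Python's fall-through returns None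
-- (no list): the port yields [] there, outside Pre_.
def vfA_go (phoneme : List String) (reverse_list : List String) (i : Nat) : List String :=
  if i ≤ phoneme.length then
    match PySem.List.pyGet? phoneme (-(i : Int)) with
    | none => []          -- unreachable for 1 ≤ i ≤ len
    | some p =>
      match PySem.List.pyGet? p.toList (-1) with
      | none => []        -- IndexError: ''[-1]; excluded by Pre_
      | some c =>
        if ¬ (['0', '1', '2'].contains c) then
          vfA_go phoneme (reverse_list ++ [p]) (i + 1)
        else
          reverse_list ++ [p]
  else []                 -- loop ends without return: Python returns None; excluded by Pre_
termination_by phoneme.length + 1 - i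
decreasing_by omega

def vowel_finder (phoneme : List String) : List String :=
  vfA_go phoneme [] 1

-- ===== PORT B =====
-- Source B's test 'p and p[-1] in '012''
def stressB (p : String) : Bool :=
  if p = "" then false
  else
    match PySem.List.pyGet? p.toList (-1) with
    | some c => ['0', '1', '2'].contains c
    | none => false

-- Source B: forward enumerate scan keeping the last matching index, then phoneme[idx:][::-1].
-- The Python returns None when idx is None; the port yields [] there (outside Pre_).
def vowel_finder_alt (phoneme : List String) : List String :=
  let idx : Option Int :=
    (PySem.List.enumerate phoneme 0).foldl
      (fun acc ip => if stressB ip.2 then some ip.1 else acc) none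
  match idx with
  | none => []
  | some i => (PySem.List.slice phoneme (some i) none).reverse

-- ===== PRECONDITION & SPEC =====
-- Helper for Pre_ only: the phoneme ends in a stress digit.
def hasStressEnd (p : String) : Bool :=
  match p.toList.getLast? with
  | some c => ['0', '1', '2'].contains c
  | none => false

-- Pre_ excludes (a) inputs with no stress-marked phoneme — there A falls through and
-- returns None, not a list (B's Python also returns None there) — and (b) inputs where,
-- scanning from the end, an empty-string phoneme precedes every stress-marked one —
-- there A raises IndexError on ''[-1].
def Pre_vowel_finder (phoneme : List String) : Prop :=
  ∃ k, k < phoneme.reverse.length ∧ hasStressEnd (phoneme.reverse.getD k "") = true ∧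
    ∀ j < k, phoneme.reverse.getD j "" ≠ ""

instance (phoneme : List String) : Decidable (Pre_vowel_finder phoneme) := by
  unfold Pre_vowel_finder; infer_instance

def pvWitness_vowel_finder : List String := ["A", "HI0", "D"]

def Spec_vowel_finder (phoneme : List String) (out : List String) : Prop := out = vowel_finder_alt phoneme
instance (phoneme : List String) (out : List String) : Decidable (Spec_vowel_finder phoneme out) := by unfold Spec_vowel_finder; infer_instance

-- ===== CLAIM (what is proved, stated in full; the proofs are below) =====
def Claim_equal_vowel_finder : Prop := ∀ (phoneme : List String), Dom_vowel_finder phoneme → Pre_vowel_finder phoneme → Spec_vowel_finder phoneme (vowel_finder phoneme)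

-- ===== LEMMAS AND PROOFS =====

-- Reference value: scanning a list (A scans phoneme.reverse), everything up to and
-- including the first stress-marked element.
def takeToStress : List String → List String
  | [] => []
  | p :: rest => if hasStressEnd p then [p] else p :: takeToStress rest

-- A returns normally on the reversed scan list r iff: some element is stress-marked and
-- every element before the first such is nonempty.
def okTail : List String → Prop
  | [] => False
  | p :: rest => if hasStressEnd p then True else (p ≠ "" ∧ okTail rest)

-- index of the last stress-marked element (what B's fold computes)
def lastStressIdx : List String → Option Nat
  | [] => none
  | p :: rest =>
    match lastStressIdx rest with
    | some k => some (k + 1)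
    | none => if hasStressEnd p then some 0 else none

theorem stressB_eq (p : String) : stressB p = hasStressEnd p := by
  simp only [stressB, hasStressEnd, PySem.List.pyGet?_neg_one]
  by_cases h : p = ""
  · subst h; simp
  · simp [h]

theorem hasStressEnd_ne_empty {p : String} (h : hasStressEnd p = true) : p ≠ "" := by
  intro he; subst he; simp [hasStressEnd] at h

theorem getLast?_of_ne_empty {p : String} (h : p ≠ "") :
    ∃ c, p.toList.getLast? = some c := by
  have : p.toList ≠ [] := by
    intro hn
    apply h
    have := congrArg String.ofList hn
    simpa using this
  cases hl : p.toList.getLast? with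
  | none => exact absurd (List.getLast?_eq_none_iff.mp hl) this
  | some c => exact ⟨c, rfl⟩

-- B's fold over enumerate computes lastStressIdx (shifted by the start value).
theorem foldl_lastStressIdx (xs : List String) (s : Int) (acc : Option Int) :
    (PySem.List.enumerate xs s).foldl
      (fun acc ip => if stressB ip.2 then some ip.1 else acc) acc
    = match lastStressIdx xs with
      | some k => some (s + k)
      | none => acc := by
  induction xs generalizing s acc with
  | nil => simp [PySem.List.enumerate_nil, lastStressIdx]
  | cons p rest ih =>
    rw [PySem.List.enumerate_cons]
    simp only [List.foldl_cons]
    rw [ih]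
    cases h : lastStressIdx rest with
    | some k =>
      simp only [lastStressIdx, h]
      congr 1
      push_cast
      ring
    | none =>
      by_cases hp : hasStressEnd p = true
      · simp [lastStressIdx, h, hp, stressB_eq]
      · simp [lastStressIdx, h, hp, stressB_eq]

theorem lastStressIdx_append (ys : List String) (p : String) :
    lastStressIdx (ys ++ [p])
    = if hasStressEnd p then some ys.length else lastStressIdx ys := by
  induction ys with
  | nil => simp [lastStressIdx]
  | cons q t ih =>
    simp only [List.cons_append, lastStressIdx, ih]
    by_cases hp : hasStressEnd p = true
    · simp [hp]
    · simp [hp]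

-- Bridge: under okTail, B's locate-then-slice value equals the reference value.
theorem bridge (xs : List String) (hok : okTail xs.reverse) :
    ∃ i, i < xs.length ∧ lastStressIdx xs = some i ∧
      (xs.drop i).reverse = takeToStress xs.reverse := by
  induction xs using List.reverseRecOn with
  | nil => simp [okTail] at hok
  | append_singleton ys p ih =>
    rw [List.reverse_append] at hok ⊢
    simp only [List.reverse_cons, List.reverse_nil, List.nil_append, List.singleton_append] at hok ⊢
    by_cases hp : hasStressEnd p = true
    · refine ⟨ys.length, by simp, ?_, ?_⟩
      · rw [lastStressIdx_append, if_pos hp]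
      · rw [List.drop_left]
        simp [takeToStress, hp]
    · have hok' : p ≠ "" ∧ okTail ys.reverse := by
        simpa [okTail, hp] using hok
      obtain ⟨i, hilt, hlast, hdrop⟩ := ih hok'.2
      refine ⟨i, by simp; omega, ?_, ?_⟩
      · rw [lastStressIdx_append, if_neg (by simp [hp]), hlast]
      · rw [List.drop_append_of_le_length (by omega)]
        simp [takeToStress, hp, hdrop]

-- A's loop, characterised: starting at index i (1-based from the end), it appends to the
-- accumulator everything up to and including the first stress-marked element.
theorem vfA_go_eq (phoneme : List String) :
    ∀ (d i : Nat) (acc : List String), 1 ≤ i → i + d = phoneme.length + 1 →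
    okTail (phoneme.reverse.drop (i - 1)) →
    vfA_go phoneme acc i = acc ++ takeToStress (phoneme.reverse.drop (i - 1)) := by
  intro d
  induction d with
  | zero =>
    intro i acc h1 hd hok
    have hnil : phoneme.reverse.drop (i - 1) = [] :=
      List.drop_eq_nil_of_le (by simp; omega)
    rw [hnil] at hok
    simp [okTail] at hok
  | succ d ih =>
    intro i acc h1 hd hok
    have hlt : i - 1 < phoneme.reverse.length := by
      by_contra hge
      rw [List.drop_eq_nil_of_le (by omega)] at hok
      simp [okTail] at hok
    have hlen : i - 1 < phoneme.length := by simpa using hlt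
    have hile : i ≤ phoneme.length := by omega
    have hdrop : phoneme.reverse.drop (i - 1)
        = phoneme.reverse[i - 1] :: phoneme.reverse.drop i := by
      have := List.drop_eq_getElem_cons hlt
      simpa [Nat.sub_add_cancel h1] using this
    set p := phoneme.reverse[i - 1] with hp
    have hget : PySem.List.pyGet? phoneme (-(i : Int)) = some p := by
      rw [PySem.List.pyGet?_neg_natCast phoneme i (by omega) hile]
      have hx : phoneme.reverse[i - 1]? = some p := List.getElem?_eq_getElem hlt
      rw [List.getElem?_reverse hlen] at hx
      have heq : phoneme.length - 1 - (i - 1) = phoneme.length - i := by omega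
      rw [heq] at hx
      exact hx
    rw [hdrop] at hok
    rw [vfA_go, if_pos hile]
    simp only [hget]
    by_cases hs : hasStressEnd p = true
    · obtain ⟨c, hc⟩ := getLast?_of_ne_empty (hasStressEnd_ne_empty hs)
      have hse : hasStressEnd p = (['0', '1', '2'].contains c) := by
        simp [hasStressEnd, hc]
      have hcs : (['0', '1', '2'].contains c) = true := by rw [← hse]; exact hs
      simp only [PySem.List.pyGet?_neg_one, hc, hcs, not_true_eq_false, if_false]
      rw [hdrop]
      simp [takeToStress, hs]
    · rw [Bool.not_eq_true] at hs
      have hok' : p ≠ "" ∧ okTail (phoneme.reverse.drop i) := by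
        simpa [okTail, hs] using hok
      obtain ⟨c, hc⟩ := getLast?_of_ne_empty hok'.1
      have hse : hasStressEnd p = (['0', '1', '2'].contains c) := by
        simp [hasStressEnd, hc]
      have hcs : (['0', '1', '2'].contains c) = false := by rw [← hse]; exact hs
      simp only [PySem.List.pyGet?_neg_one, hc, hcs, Bool.false_eq_true,
        not_false_eq_true, if_true]
      have := ih (i + 1) (acc ++ [p]) (by omega) (by omega)
        (by simpa [Nat.add_sub_cancel] using hok'.2)
      rw [this]
      rw [hdrop]
      simp [takeToStress, hs]

theorem okTail_iff (r : List String) :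
    okTail r ↔ ∃ k, k < r.length ∧ hasStressEnd (r.getD k "") = true ∧
      ∀ j < k, r.getD j "" ≠ "" := by
  induction r with
  | nil => simp [okTail]
  | cons p rest ih =>
    by_cases hp : hasStressEnd p = true
    · simp only [okTail, hp, if_true]
      constructor
      · intro _; exact ⟨0, by simp, by simpa using hp, by omega⟩
      · intro _; trivial
    · simp only [okTail, hp, if_false, Bool.false_eq_true, ih]
      constructor
      · rintro ⟨hne, k, hk, hs, hall⟩
        refine ⟨k + 1, by simpa using hk, by simpa using hs, ?_⟩
        intro j hj
        cases j with
        | zero => simpa using hne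
        | succ j' => simpa using hall j' (by omega)
      · rintro ⟨k, hk, hs, hall⟩
        cases k with
        | zero => rw [List.getD_cons_zero] at hs; exact absurd hs hp
        | succ k' =>
          refine ⟨by simpa using hall 0 (by omega), k', by simpa using hk, by simpa using hs, ?_⟩
          intro j hj
          simpa using hall (j + 1) (by omega)

-- ===== VERDICT (by name: the statement is the Claim_ definition above) =====
theorem vowel_finder_spec : Claim_equal_vowel_finder := by
  intro phoneme _ hpre
  unfold Spec_vowel_finder
  have hok : okTail phoneme.reverse := (okTail_iff phoneme.reverse).mpr hpre
  have hA : vowel_finder phoneme = takeToStress phoneme.reverse := by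
    rw [vowel_finder, vfA_go_eq phoneme phoneme.length 1 [] (by omega) (by omega)
      (by simpa using hok)]
    simp
  obtain ⟨i, hilt, hlast, hdrop⟩ := bridge phoneme hok
  have hB : vowel_finder_alt phoneme = takeToStress phoneme.reverse := by
    rw [vowel_finder_alt]
    simp only [foldl_lastStressIdx, hlast]
    have : PySem.List.slice phoneme (some ((0 : Int) + (i : Int))) none = phoneme.drop i := by
      rw [zero_add, PySem.List.slice_from_natCast]
    rw [this, hdrop]
  rw [hA, hB]
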